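-- pv_equiv track=rewrite | github.com/hugo17051989/Bai-tap-Python | homework/bai123.py | gomnhomtu
-- ===== SOURCE A (Python) =====
-- def gomnhomtu(s):
--     kq={}
--     for i in s:
--         if i not in kq:
--             kq[i]=[i]
--         else:
--             kq[i].append(i)
--     return kq
-- ===== SOURCE B (Python) =====
-- def gomnhomtu(s):
--     # count each character once, then build each group by multiplication
--     counts = {}
--     for c in s:
--         counts[c] = counts.get(c, 0) + 1
--     return {c: [c] * n for c, n in counts.items()}
-- ===== Notes on version B (the rewrite author's own statement) =====
-- stated objective: alternative
-- what changed: B replaces A's interleaved membership-test-then-append loop with a count-then-construct decomposition: one pass builds a frequency table, a second pass builds each group as [c]*n.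
import Mathlib
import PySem

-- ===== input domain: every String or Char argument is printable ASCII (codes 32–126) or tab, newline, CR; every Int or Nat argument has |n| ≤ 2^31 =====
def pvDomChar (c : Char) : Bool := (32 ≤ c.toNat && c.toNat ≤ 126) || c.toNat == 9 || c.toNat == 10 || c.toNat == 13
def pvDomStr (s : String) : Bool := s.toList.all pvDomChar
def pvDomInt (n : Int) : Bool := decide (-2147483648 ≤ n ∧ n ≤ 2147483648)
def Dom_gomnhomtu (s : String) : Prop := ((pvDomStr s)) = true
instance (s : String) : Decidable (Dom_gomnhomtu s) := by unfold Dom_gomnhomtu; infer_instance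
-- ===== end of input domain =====

-- B groups identical characters by counting first and then building each group as [c]*n,
-- instead of A's interleaved membership-test-then-append loop; alternative decomposition, same cost.

-- ===== PORT A =====
-- one iteration of A's loop body: if i not in kq: kq[i]=[i] else: kq[i].append(i)
-- (the in-place append is ported as overwriting the key with the appended list; same dict value)
def pvStepA (d : PySem.Dict String (List String)) (i : String) : PySem.Dict String (List String) :=
  if d.contains i = false then d.insert i [i] else d.insert i (d.getD i [] ++ [i])

def gomnhomtu (s : String) : List (String × List String) :=
  ((s.toList.map (fun c => String.ofList [c])).foldl pvStepA PySem.Dict.empty).items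

-- ===== PORT B =====
def gomnhomtu_alt (s : String) : List (String × List String) :=
  let counts := (s.toList.map (fun c => String.ofList [c])).foldl
      (fun (d : PySem.Dict String Int) c => d.modify c 0 (· + 1)) PySem.Dict.empty
  counts.items.map (fun p => (p.1, List.replicate p.2.toNat p.1))

-- ===== PRECONDITION & SPEC =====
def Spec_gomnhomtu (s : String) (out : List (String × List String)) : Prop := out = gomnhomtu_alt s
instance (s : String) (out : List (String × List String)) : Decidable (Spec_gomnhomtu s out) := by unfold Spec_gomnhomtu; infer_instance

-- ===== CLAIM (what is proved, stated in full; the proofs are below) =====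
def Claim_equal_gomnhomtu : Prop := ∀ (s : String), Dom_gomnhomtu s → Spec_gomnhomtu s (gomnhomtu s)

-- ===== LEMMAS AND PROOFS =====

-- the dict A's loop has built after consuming the prefix p (groups in first-seen order)
def pvG (p : List String) : PySem.Dict String (List String) :=
  PySem.Dict.mk ((PySem.Set.ofList p).map (fun k => (k, List.replicate (p.count k) k)))

theorem pvDict_ext {κ ν : Type} [BEq κ] (d e : PySem.Dict κ ν) (h : d.items = e.items) : d = e := by
  cases d; cases e; exact congrArg _ h

theorem pvG_keys (p : List String) : (pvG p).keys = PySem.Set.ofList p := by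
  show List.map Prod.fst ((PySem.Set.ofList p).map _) = _
  rw [List.map_map]
  exact List.map_id _

theorem pvG_contains (p : List String) (x : String) :
    (pvG p).contains x = decide (x ∈ p) := by
  rw [PySem.Dict.contains_eq_decide_mem_keys, pvG_keys]
  simp [PySem.Set.mem_ofList]

theorem pvG_getD (p : List String) (x : String) (hx : x ∈ p) :
    (pvG p).getD x [] = List.replicate (p.count x) x := by
  apply PySem.Dict.getD_of_mem_items
  · show (x, List.replicate (p.count x) x) ∈ (PySem.Set.ofList p).map _
    exact List.mem_map.mpr ⟨x, (PySem.Set.mem_ofList _ _).mpr hx, rfl⟩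
  · rw [pvG_keys]; exact PySem.Set.nodup_ofList p

theorem pvStepA_G (p : List String) (x : String) : pvStepA (pvG p) x = pvG (p ++ [x]) := by
  apply pvDict_ext
  by_cases hx : x ∈ p
  · rw [pvStepA, pvG_contains]
    simp only [hx, decide_true, Bool.true_eq_false, if_false]
    rw [pvG_getD p x hx,
        PySem.Dict.items_insert_of_contains _ _ (by rw [pvG_contains]; simpa using hx)]
    show ((PySem.Set.ofList p).map _).map _ = (PySem.Set.ofList (p ++ [x])).map _
    rw [PySem.Set.ofList_append_singleton, PySem.Set.add_of_mem ((PySem.Set.mem_ofList _ _).mpr hx),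
        List.map_map]
    apply List.map_congr_left
    intro k _
    by_cases hk : k = x
    · subst hk
      simp [List.count_append, ← List.replicate_succ']
    · simp [Function.comp, hk, List.count_append, Ne.symm hk]
  · rw [pvStepA, pvG_contains]
    simp only [hx, decide_false, if_true]
    rw [PySem.Dict.items_insert_of_not_contains _ _ (by rw [pvG_contains]; simp [hx])]
    show (PySem.Set.ofList p).map _ ++ [(x, [x])] = (PySem.Set.ofList (p ++ [x])).map _
    rw [PySem.Set.ofList_append_singleton, PySem.Set.add_of_not_mem (by
      rw [PySem.Set.mem_ofList]; exact hx), List.map_append]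
    congr 1
    · apply List.map_congr_left
      intro k hk
      have hkx : k ≠ x := by
        rintro rfl; exact hx ((PySem.Set.mem_ofList _ _).mp hk)
      simp [List.count_append, Ne.symm hkx]
    · simp [List.count_append, List.count_singleton,
        List.count_eq_zero_of_not_mem hx, List.replicate_succ]

theorem pvFold_G (xs p : List String) : xs.foldl pvStepA (pvG p) = pvG (p ++ xs) := by
  induction xs generalizing p with
  | nil => simp
  | cons x xs ih =>
    rw [List.foldl_cons, pvStepA_G, ih]
    simp

theorem pvG_nil : pvG [] = PySem.Dict.empty := rfl

-- ===== VERDICT (by name: the statement is the Claim_ definition above) =====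
theorem gomnhomtu_spec : Claim_equal_gomnhomtu := by
  intro s _
  show gomnhomtu s = gomnhomtu_alt s
  rw [gomnhomtu, gomnhomtu_alt, ← pvG_nil, pvFold_G, List.nil_append]
  rw [show (fun (d : PySem.Dict String Int) c => d.modify c 0 (· + 1)) =
      (fun (d : PySem.Dict String Int) c => d.modify c 0 (· + 1)) from rfl]
  rw [← PySem.Dict.counter_eq_foldl, PySem.Dict.items_counter, List.map_map]
  show (PySem.Set.ofList _).map _ = (PySem.Set.ofList _).map _
  apply List.map_congr_left
  intro k _
  simp
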